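/- CodeD.lean -- generated by proofs/c6/mkbytes.py: where every function of jsmn_d.bin is inside the image. -/
import X86.Derived.Prog.Reach
import X86.Derived.Prog.StateSimp
import Prog.Jsmn.JsmnDBytes

namespace X86
namespace JsmnD
open X86.User (CodeAt RegsKept Span FlagsOK Layout toNat_add_ofNat toNat_ofNat_lt' add_ofNat_add)
open JsmnDBytes

set_option maxRecDepth 1000000
set_option maxHeartbeats 4000000

theorem tjd_start_jsmn_code {mem : User.Mem} (h : CodeAt mem 0x100000 image_bytes) : CodeAt mem 0x100000 start_jsmn_bytes :=
  h.at _ 0x0 54 _ (by decide) (by decide) (by decide)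
theorem tjd_jsmn_alloc_token_code {mem : User.Mem} (h : CodeAt mem 0x100000 image_bytes) : CodeAt mem 0x100040 jsmn_alloc_token_bytes :=
  h.at _ 0x40 54 _ (by decide) (by decide) (by decide)
theorem tjd_jsmn_fill_token_code {mem : User.Mem} (h : CodeAt mem 0x100000 image_bytes) : CodeAt mem 0x100076 jsmn_fill_token_bytes :=
  h.at _ 0x76 16 _ (by decide) (by decide) (by decide)
theorem tjd_jsmn_parse_primitive_code {mem : User.Mem} (h : CodeAt mem 0x100000 image_bytes) : CodeAt mem 0x100086 jsmn_parse_primitive_bytes :=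
  h.at _ 0x86 174 _ (by decide) (by decide) (by decide)
theorem tjd_jsmn_parse_string_code {mem : User.Mem} (h : CodeAt mem 0x100000 image_bytes) : CodeAt mem 0x100134 jsmn_parse_string_bytes :=
  h.at _ 0x134 326 _ (by decide) (by decide) (by decide)
theorem tjd_jsmn_parse_code {mem : User.Mem} (h : CodeAt mem 0x100000 image_bytes) : CodeAt mem 0x10027a jsmn_parse_bytes :=
  h.at _ 0x27a 731 _ (by decide) (by decide) (by decide)
theorem tjd_jsmn_init_code {mem : User.Mem} (h : CodeAt mem 0x100000 image_bytes) : CodeAt mem 0x100555 jsmn_init_bytes :=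
  h.at _ 0x555 21 _ (by decide) (by decide) (by decide)
theorem tjd_jsmn_run_code {mem : User.Mem} (h : CodeAt mem 0x100000 image_bytes) : CodeAt mem 0x10056a jsmn_run_bytes :=
  h.at _ 0x56a 65 _ (by decide) (by decide) (by decide)
theorem tjd_jsmn_main_code {mem : User.Mem} (h : CodeAt mem 0x100000 image_bytes) : CodeAt mem 0x1005ab jsmn_main_bytes :=
  h.at _ 0x5ab 38 _ (by decide) (by decide) (by decide)
theorem tjd_start_call6_code {mem : User.Mem} (h : CodeAt mem 0x100000 image_bytes) : CodeAt mem 0x1005e0 start_call6_bytes :=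
  h.at _ 0x5e0 75 _ (by decide) (by decide) (by decide)

end JsmnD
end X86
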